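-- pv_equiv track=rewrite | github.com/zihao-ai/EAIRiskBench | plan_evaluation.py | plan_execution_evaluation
-- ===== SOURCE A (Python) =====
-- def plan_execution_evaluation(skill_set, plans):
--     for i, plan in enumerate(plans):
--         plan_executable = False
--         for skill in skill_set:
--             if skill.lower() in plan.lower():
--                 plan_executable = True
--                 break
--         if "warning" in plan.lower() or "done" in plan.lower():
--             plan_executable = True
--         if not plan_executable:
--             return {"result": "Unexecutable", "reason": f"Step {i+1} is not executable: '{plan}'"}
--
--     return {"result": "Executable", "reason": "All steps are executable"}
-- ===== SOURCE B (Python) =====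
-- def plan_execution_evaluation(skill_set, plans):
--     # Text-driven multi-pattern matching: build a hash set of lowered patterns
--     # once, then test every window of each (once-lowered) plan against the set,
--     # one pass per distinct pattern length.
--     pats = {s.lower() for s in skill_set}
--     pats.update(("warning", "done"))
--     lens = sorted({len(q) for q in pats})
--     for i, plan in enumerate(plans):
--         low = plan.lower()
--         n = len(low)
--         if not any(low[j:j + m] in pats for m in lens for j in range(n - m + 1)):
--             return {"result": "Unexecutable",
--                     "reason": f"Step {i+1} is not executable: '{plan}'"}
--     return {"result": "Executable", "reason": "All steps are executable"}
-- ===== Notes on version B (the rewrite author's own statement) =====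
-- stated objective: faster
-- what changed: Replaces A's pattern-driven scan (each skill lowered and searched inside each plan, the plan re-lowered for every skill) by a text-driven scan: one hash set of lowered patterns (skills plus 'warning'/'done') built once, each plan lowered once, and every window of each distinct pattern length tested against the set.
import Mathlib
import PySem

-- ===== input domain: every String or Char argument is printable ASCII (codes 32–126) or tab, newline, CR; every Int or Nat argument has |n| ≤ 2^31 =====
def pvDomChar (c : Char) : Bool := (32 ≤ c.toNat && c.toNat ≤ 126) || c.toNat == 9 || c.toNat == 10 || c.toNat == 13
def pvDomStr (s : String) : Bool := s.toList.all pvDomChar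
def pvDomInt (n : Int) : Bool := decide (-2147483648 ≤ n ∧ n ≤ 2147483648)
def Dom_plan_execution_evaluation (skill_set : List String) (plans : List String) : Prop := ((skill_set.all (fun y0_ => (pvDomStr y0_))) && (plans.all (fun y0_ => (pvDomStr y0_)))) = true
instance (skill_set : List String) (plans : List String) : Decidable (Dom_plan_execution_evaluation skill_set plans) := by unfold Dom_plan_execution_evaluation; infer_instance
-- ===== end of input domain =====

-- ===== PORT A =====
-- B replaces A's per-skill substring scans by a set of lowered patterns tested
-- against every window of the once-lowered plan (alternative algorithm; return value only).

-- inner 'for skill in skill_set: if … : plan_executable = True; break' loop of A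
def pvASkillLoop : List String → String → Bool
  | [], _ => false
  | skill :: rest, plan =>
    if PySem.Str.isIn (PySem.Str.lower skill) (PySem.Str.lower plan) then true
    else pvASkillLoop rest plan

-- outer 'for i, plan in enumerate(plans)' loop of A (i is the running index)
def pvALoop (skill_set : List String) : List String → Int → List (String × String)
  | [], _ => [("result", "Executable"), ("reason", "All steps are executable")]
  | plan :: rest, i =>
    let pe := pvASkillLoop skill_set plan
    let pe := if PySem.Str.isIn "warning" (PySem.Str.lower plan)
                 || PySem.Str.isIn "done" (PySem.Str.lower plan) then true else pe
    if !pe then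
      [("result", "Unexecutable"),
       ("reason", "Step " ++ PySem.Int.toStr (i + 1) ++ " is not executable: '" ++ plan ++ "'")]
    else pvALoop skill_set rest (i + 1)

def plan_execution_evaluation (skill_set : List String) (plans : List String) :
    List (String × String) :=
  pvALoop skill_set plans 0

-- ===== PORT B =====
-- 'any(low[j:j+m] in pats for m in lens for j in range(n - m + 1))'
def pvBWindowOk (pats : PySem.Set String) (lens : List Int) (low : String) : Bool :=
  lens.any (fun m =>
    (PySem.List.pyRange 0 (PySem.Str.len low - m + 1) 1).any (fun j =>
      pats.contains (PySem.Str.slice low (some j) (some (j + m)))))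

-- 'for i, plan in enumerate(plans)' loop of B
def pvBLoop (pats : PySem.Set String) (lens : List Int) :
    List String → Int → List (String × String)
  | [], _ => [("result", "Executable"), ("reason", "All steps are executable")]
  | plan :: rest, i =>
    let low := PySem.Str.lower plan
    if !pvBWindowOk pats lens low then
      [("result", "Unexecutable"),
       ("reason", "Step " ++ PySem.Int.toStr (i + 1) ++ " is not executable: '" ++ plan ++ "'")]
    else pvBLoop pats lens rest (i + 1)

def plan_execution_evaluation_alt (skill_set : List String) (plans : List String) :
    List (String × String) :=
  let pats := (PySem.Set.ofList (skill_set.map PySem.Str.lower)).update ["warning", "done"]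
  let lens := PySem.List.sorted (PySem.Set.ofList (pats.map PySem.Str.len)) id
  pvBLoop pats lens plans 0

-- ===== PRECONDITION & SPEC =====
def Spec_plan_execution_evaluation (skill_set : List String) (plans : List String) (out : List (String × String)) : Prop := out = plan_execution_evaluation_alt skill_set plans
instance (skill_set : List String) (plans : List String) (out : List (String × String)) : Decidable (Spec_plan_execution_evaluation skill_set plans out) := by unfold Spec_plan_execution_evaluation; infer_instance

-- ===== CLAIM (what is proved, stated in full; the proofs are below) =====
def Claim_equal_plan_execution_evaluation : Prop := ∀ (skill_set : List String) (plans : List String), Dom_plan_execution_evaluation skill_set plans → Spec_plan_execution_evaluation skill_set plans (plan_execution_evaluation skill_set plans)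

-- ===== LEMMAS AND PROOFS =====

-- proof-side names for B's pattern set and length list
def pvPats (skill_set : List String) : PySem.Set String :=
  (PySem.Set.ofList (skill_set.map PySem.Str.lower)).update ["warning", "done"]

def pvLens (skill_set : List String) : List Int :=
  PySem.List.sorted (PySem.Set.ofList ((pvPats skill_set).map PySem.Str.len)) id

-- A's inner loop is an existential over the skill set
theorem pvASkillLoop_eq_true (skill_set : List String) (plan : String) :
    pvASkillLoop skill_set plan = true ↔
      ∃ s ∈ skill_set, PySem.Str.isIn (PySem.Str.lower s) (PySem.Str.lower plan) = true := by
  induction skill_set with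
  | nil => simp [pvASkillLoop]
  | cons skill rest ih =>
    simp only [pvASkillLoop]
    split_ifs with h
    · exact iff_of_true rfl ⟨skill, List.mem_cons_self, h⟩
    · rw [ih]
      constructor
      · rintro ⟨s, hs, h2⟩; exact ⟨s, List.mem_cons_of_mem _ hs, h2⟩
      · rintro ⟨s, hs, h2⟩
        rcases List.mem_cons.mp hs with rfl | hs'
        · exact absurd h2 h
        · exact ⟨s, hs', h2⟩

-- membership in B's pattern set
theorem pvMem_pats (skill_set : List String) (q : String) :
    q ∈ pvPats skill_set ↔
      (∃ s ∈ skill_set, q = PySem.Str.lower s) ∨ q = "warning" ∨ q = "done" := by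
  unfold pvPats
  rw [PySem.Set.mem_update, PySem.Set.mem_ofList]
  simp [List.mem_map, eq_comm]

-- a window of low is an infix of low
theorem pvWindow_infix (low : String) (j m : Int) (hj : 0 ≤ j) (hm : 0 ≤ m) :
    (PySem.Str.slice low (some j) (some (j + m))).toList <:+: low.toList := by
  rw [PySem.Str.toList_slice, PySem.Chars.slice_eq_listSlice]
  have hj' : j = ((j.toNat : Nat) : Int) := by omega
  have hm' : m = ((m.toNat : Nat) : Int) := by omega
  rw [hj', hm', PySem.List.slice_natCast_add]
  exact ((List.take_prefix _ _).isInfix).trans (List.drop_suffix _ _).isInfix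

-- an infix pattern is recovered as a window
theorem pvInfix_window (low q : String) (h : q.toList <:+: low.toList) :
    ∃ j : Int, 0 ≤ j ∧ j < PySem.Str.len low - PySem.Str.len q + 1 ∧
      PySem.Str.slice low (some j) (some (j + PySem.Str.len q)) = q := by
  obtain ⟨pre, suf, hps⟩ := h
  refine ⟨(pre.length : Int), by positivity, ?_, ?_⟩
  · have hlen : pre.length + q.toList.length ≤ low.toList.length := by
      rw [← hps]; simp
    simp only [PySem.Str.len_eq]
    omega
  · rw [← String.toList_inj, PySem.Str.toList_slice, PySem.Chars.slice_eq_listSlice,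
      PySem.Str.len_eq, PySem.List.slice_natCast_add, ← hps]
    simp

-- lengths of patterns are nonnegative
theorem pvLen_nonneg (q : String) : 0 ≤ PySem.Str.len q := by
  simp [PySem.Str.len_eq]

-- any pattern of the set that occurs in low is found by the window scan
theorem pvWindowOk_of_pat (skill_set : List String) (plan q : String)
    (hq : q ∈ pvPats skill_set)
    (hin : PySem.Str.isIn q (PySem.Str.lower plan) = true) :
    pvBWindowOk (pvPats skill_set) (pvLens skill_set) (PySem.Str.lower plan) = true := by
  have hinf : q.toList <:+: (PySem.Str.lower plan).toList := by
    rw [PySem.Str.isIn_eq] at hin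
    exact (PySem.Chars.isIn_iff_infix _ _).mp hin
  obtain ⟨j, hj0, hjlt, hslice⟩ := pvInfix_window (PySem.Str.lower plan) q hinf
  refine List.any_eq_true.mpr ⟨PySem.Str.len q, ?_, List.any_eq_true.mpr ⟨j, ?_, ?_⟩⟩
  · unfold pvLens
    rw [PySem.List.mem_sorted, PySem.Set.mem_ofList]
    exact List.mem_map.mpr ⟨q, hq, rfl⟩
  · exact PySem.List.mem_pyRange_one.mpr ⟨hj0, hjlt⟩
  · rw [hslice]
    exact (PySem.Set.contains_iff _ _).mpr hq

-- the window scan and A's checks find the same plans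
theorem pvCheck_iff (skill_set : List String) (plan : String) :
    pvBWindowOk (pvPats skill_set) (pvLens skill_set) (PySem.Str.lower plan) = true ↔
      (pvASkillLoop skill_set plan = true ∨
        PySem.Str.isIn "warning" (PySem.Str.lower plan) = true ∨
        PySem.Str.isIn "done" (PySem.Str.lower plan) = true) := by
  constructor
  · intro h
    obtain ⟨m, hm, h2⟩ := List.any_eq_true.mp h
    obtain ⟨j, hjmem, hcon⟩ := List.any_eq_true.mp h2
    obtain ⟨hj0, _⟩ := PySem.List.mem_pyRange_one.mp hjmem
    have hm' : m ∈ (pvPats skill_set).map PySem.Str.len := by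
      unfold pvLens at hm
      rw [PySem.List.mem_sorted, PySem.Set.mem_ofList] at hm
      exact hm
    obtain ⟨q', _, rfl⟩ := List.mem_map.mp hm'
    have hqmem : PySem.Str.slice (PySem.Str.lower plan) (some j) (some (j + PySem.Str.len q'))
        ∈ pvPats skill_set := (PySem.Set.contains_iff _ _).mp hcon
    have hisin : PySem.Str.isIn
        (PySem.Str.slice (PySem.Str.lower plan) (some j) (some (j + PySem.Str.len q')))
        (PySem.Str.lower plan) = true := by
      rw [PySem.Str.isIn_eq]
      exact (PySem.Chars.isIn_iff_infix _ _).mpr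
        (pvWindow_infix (PySem.Str.lower plan) j (PySem.Str.len q') hj0 (pvLen_nonneg q'))
    rcases (pvMem_pats skill_set _).mp hqmem with ⟨s, hs, hq⟩ | hq | hq
    · left
      refine (pvASkillLoop_eq_true _ _).mpr ⟨s, hs, ?_⟩
      rw [← hq]; exact hisin
    · right; left; rw [← hq]; exact hisin
    · right; right; rw [← hq]; exact hisin
  · rintro (h | h | h)
    · obtain ⟨s, hs, hin⟩ := (pvASkillLoop_eq_true _ _).mp h
      exact pvWindowOk_of_pat skill_set plan _
        ((pvMem_pats _ _).mpr (Or.inl ⟨s, hs, rfl⟩)) hin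
    · exact pvWindowOk_of_pat skill_set plan _
        ((pvMem_pats _ _).mpr (Or.inr (Or.inl rfl))) h
    · exact pvWindowOk_of_pat skill_set plan _
        ((pvMem_pats _ _).mpr (Or.inr (Or.inr rfl))) h

-- the per-plan checks agree as Booleans
theorem pvCheck_eq (skill_set : List String) (plan : String) :
    pvBWindowOk (pvPats skill_set) (pvLens skill_set) (PySem.Str.lower plan) =
      (if PySem.Str.isIn "warning" (PySem.Str.lower plan)
          || PySem.Str.isIn "done" (PySem.Str.lower plan) then true
       else pvASkillLoop skill_set plan) := by
  rw [Bool.eq_iff_iff, pvCheck_iff]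
  split_ifs with h
  · rcases Bool.or_eq_true_iff.mp h with hw | hd
    · exact iff_of_true (Or.inr (Or.inl hw)) rfl
    · exact iff_of_true (Or.inr (Or.inr hd)) rfl
  · rw [Bool.or_eq_true_iff] at h
    obtain ⟨h1, h2⟩ := not_or.mp h
    constructor
    · rintro (ha | hw | hd)
      · exact ha
      · exact absurd hw h1
      · exact absurd hd h2
    · exact Or.inl

-- the two outer loops agree
theorem pvLoop_eq (skill_set : List String) (plans : List String) (i : Int) :
    pvALoop skill_set plans i = pvBLoop (pvPats skill_set) (pvLens skill_set) plans i := by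
  induction plans generalizing i with
  | nil => rfl
  | cons plan rest ih =>
    simp only [pvALoop, pvBLoop]
    rw [← pvCheck_eq skill_set plan]
    split
    · rfl
    · exact ih (i + 1)

-- ===== VERDICT (by name: the statement is the Claim_ definition above) =====
theorem plan_execution_evaluation_spec : Claim_equal_plan_execution_evaluation := by
  intro skill_set plans _
  unfold Spec_plan_execution_evaluation plan_execution_evaluation plan_execution_evaluation_alt
  exact pvLoop_eq skill_set plans 0
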